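-- pv_equiv track=rewrite | github.com/Jpsillos2000/ccaip_user_manager | data_processor.py | gerar_ramal_unico
-- ===== SOURCE A (Python) =====
-- def gerar_ramal_unico(prefixo, ramais_existentes):
--     """Gera um ramal sequencial único para um dado prefixo."""
--     sequencial = 1
--     while True:
--         num_digitos_seq = 4 - len(prefixo)
--         if num_digitos_seq < 1: return prefixo[:4]
--
--         formato_seq = f"{{:0{num_digitos_seq}d}}"
--         ramal_candidato = f"{prefixo}{formato_seq.format(sequencial)}"
--
--         if ramal_candidato not in ramais_existentes:
--             ramais_existentes.add(ramal_candidato)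
--             return ramal_candidato
--
--         sequencial += 1
--         if sequencial >= 10**num_digitos_seq:
--             return ""
-- ===== SOURCE B (Python) =====
-- def _suffix_val(s):
--     """Value of an ASCII-digit string, or None if any char is not 0-9 (empty -> 0)."""
--     v = 0
--     for ch in s:
--         d = ord(ch) - 48
--         if d < 0 or d > 9:
--             return None
--         v = v * 10 + d
--     return v
--
-- def gerar_ramal_unico(prefixo, ramais_existentes):
--     """Gera um ramal sequencial único para um dado prefixo."""
--     if len(prefixo) >= 4:
--         return prefixo[:4]
--     num = 4 - len(prefixo)
--     vals = []
--     for r in ramais_existentes: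
--         if len(r) == 4 and r.startswith(prefixo):
--             v = _suffix_val(r[len(prefixo):])
--             if v is not None:
--                 vals.append(v)
--     expected = 1
--     for u in sorted(vals):
--         if u == expected:
--             expected += 1
--     if expected >= 10 ** num:
--         return ""
--     ramal = prefixo + str(expected).zfill(num)
--     ramais_existentes.add(ramal)
--     return ramal
-- ===== Notes on version B (the rewrite author's own statement) =====
-- stated objective: alternative
-- what changed: A probes candidate ramais one by one (format the next sequential number, test set membership, increment) until an unused one is found; B instead makes a single filtering pass that collects the integer suffixes of the existing 4-char entries matching the prefix, sorts them, and walks the sorted list with an expected counter to find the smallest unused sequential number directly, formatting it once at the end.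
import Mathlib
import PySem

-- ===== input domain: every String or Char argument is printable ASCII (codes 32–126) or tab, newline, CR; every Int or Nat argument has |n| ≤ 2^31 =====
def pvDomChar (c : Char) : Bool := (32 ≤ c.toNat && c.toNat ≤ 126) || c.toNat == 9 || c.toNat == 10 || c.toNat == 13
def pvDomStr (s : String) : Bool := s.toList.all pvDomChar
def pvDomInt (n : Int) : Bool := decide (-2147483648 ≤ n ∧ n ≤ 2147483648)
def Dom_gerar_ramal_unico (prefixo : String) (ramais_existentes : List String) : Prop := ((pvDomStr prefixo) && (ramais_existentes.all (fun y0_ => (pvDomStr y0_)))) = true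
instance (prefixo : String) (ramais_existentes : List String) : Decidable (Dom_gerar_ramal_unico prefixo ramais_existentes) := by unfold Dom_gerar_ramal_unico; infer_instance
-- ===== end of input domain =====

-- B replaces A's one-by-one candidate probing with one filtering pass plus a sorted walk over the
-- used suffix numbers (objective: alternative).  Both Pythons mutate the set ramais_existentes in
-- the same way (adding the returned ramal); the equivalence proved here is about the return value.

-- ===== PORT A =====
-- shared formatting helper: prefixo + str(n) zero-padded to width w
-- (A's f"{{:0{w}d}}".format(n) equals str(n).zfill(w) for the nonnegative n both programs format)
def pvFmt (prefixo : String) (w : Int) (n : Int) : String :=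
  String.ofList (prefixo.toList ++ PySem.Chars.zfill (PySem.Int.toChars n) w)

-- the 'while True' loop; fuel is a totality guard only (the loop runs < 10**4 iterations)
def pvALoop (prefixo : String) (ramais_existentes : List String) (fuel : Nat) (sequencial : Int) : String :=
  match fuel with
  | 0 => ""
  | Nat.succ f =>
    let num : Int := 4 - PySem.Str.len prefixo
    if num < 1 then PySem.Str.slice prefixo none (some 4)
    else
      let ramal_candidato := pvFmt prefixo num sequencial
      if ramal_candidato ∈ ramais_existentes then
        (if sequencial + 1 ≥ 10 ^ num.toNat then "" else pvALoop prefixo ramais_existentes f (sequencial + 1))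
      else ramal_candidato

def gerar_ramal_unico (prefixo : String) (ramais_existentes : List String) : String :=
  pvALoop prefixo ramais_existentes 10000 1

-- ===== PORT B =====
-- _suffix_val: value of an ASCII-digit string, none if a char is not 0-9
def pvSufVal? : List Char → Int → Option Int
  | [], v => some v
  | c :: t, v =>
    let d : Int := (c.toNat : Int) - 48
    if d < 0 ∨ 9 < d then none
    else pvSufVal? t (v * 10 + d)

-- the filtering pass: suffix numbers of the existing entries matching the prefix
def pvVals (prefixo : String) (ramais_existentes : List String) : List Int :=
  ramais_existentes.filterMap (fun r =>
    if r.toList.length == 4 && PySem.Chars.startswith r.toList prefixo.toList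
    then pvSufVal? (r.toList.drop prefixo.toList.length) 0
    else none)

def gerar_ramal_unico_alt (prefixo : String) (ramais_existentes : List String) : String :=
  let p := prefixo.toList
  if 4 ≤ p.length then String.ofList (p.take 4)
  else
    let num : Nat := 4 - p.length
    let expected : Int :=
      (PySem.List.sorted (pvVals prefixo ramais_existentes) (fun x => x) false).foldl
        (fun e u => if u = e then e + 1 else e) 1
    if (10 : Int) ^ num ≤ expected then ""
    else pvFmt prefixo (num : Int) expected

-- ===== PRECONDITION & SPEC =====
def Spec_gerar_ramal_unico (prefixo : String) (ramais_existentes : List String) (out : String) : Prop := out = gerar_ramal_unico_alt prefixo ramais_existentes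
instance (prefixo : String) (ramais_existentes : List String) (out : String) : Decidable (Spec_gerar_ramal_unico prefixo ramais_existentes out) := by unfold Spec_gerar_ramal_unico; infer_instance

-- ===== CLAIM (what is proved, stated in full; the proofs are below) =====
def Claim_equal_gerar_ramal_unico : Prop := ∀ (prefixo : String) (ramais_existentes : List String), Dom_gerar_ramal_unico prefixo ramais_existentes → Spec_gerar_ramal_unico prefixo ramais_existentes (gerar_ramal_unico prefixo ramais_existentes)

-- ===== LEMMAS AND PROOFS =====

-- a character is an ASCII decimal digit
def pvDigit (c : Char) : Prop := 48 ≤ c.toNat ∧ c.toNat ≤ 57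

-- the pure value of a digit string (what _suffix_val computes when it does not return None)
def pvV (d : List Char) : Int := d.foldl (fun a c => a * 10 + ((c.toNat : Int) - 48)) 0

theorem pvV_foldl_acc (d : List Char) (a : Int) :
    d.foldl (fun a c => a * 10 + ((c.toNat : Int) - 48)) a = a * 10 ^ d.length + pvV d := by
  induction d generalizing a with
  | nil => simp [pvV]
  | cons c t ih =>
    simp only [List.foldl_cons, List.length_cons, pvV]
    rw [ih, ih (0 * 10 + _)]
    ring

theorem pvV_cons (c : Char) (t : List Char) :
    pvV (c :: t) = ((c.toNat : Int) - 48) * 10 ^ t.length + pvV t := by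
  show t.foldl (fun a c => a * 10 + ((c.toNat : Int) - 48)) (0 * 10 + ((c.toNat : Int) - 48)) = _
  rw [pvV_foldl_acc t]; ring

theorem pvSufVal?_of_digits (d : List Char) (h : ∀ c ∈ d, pvDigit c) (a : Int) :
    pvSufVal? d a = some (a * 10 ^ d.length + pvV d) := by
  induction d generalizing a with
  | nil => simp [pvSufVal?, pvV]
  | cons c t ih =>
    have hc := h c (by simp)
    simp only [pvSufVal?]
    rw [if_neg (by simp only [pvDigit] at hc; omega)]
    rw [ih (fun x hx => h x (by simp [hx]))]
    rw [pvV_cons]; congr 1; simp only [List.length_cons]; ring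

theorem digits_of_pvSufVal? (d : List Char) (a v : Int) (h : pvSufVal? d a = some v) :
    ∀ c ∈ d, pvDigit c := by
  induction d generalizing a with
  | nil => simp
  | cons c t ih =>
    simp only [pvSufVal?] at h
    split at h
    · exact absurd h (by simp)
    · rename_i hd
      intro x hx
      rcases List.mem_cons.mp hx with rfl | hx
      · constructor <;> omega
      · exact ih _ h x hx

theorem pvV_bounds (d : List Char) (h : ∀ c ∈ d, pvDigit c) :
    0 ≤ pvV d ∧ pvV d < 10 ^ d.length := by
  induction d with
  | nil => simp [pvV]
  | cons c t ih =>
    have hc := h c (by simp)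
    simp only [pvDigit] at hc
    obtain ⟨h0, h1⟩ := ih (fun x hx => h x (by simp [hx]))
    rw [pvV_cons]
    have hdc : 0 ≤ (c.toNat : Int) - 48 ∧ (c.toNat : Int) - 48 ≤ 9 := by omega
    constructor
    · have := mul_nonneg (by omega : (0:Int) ≤ (c.toNat : Int) - 48) (by positivity : (0:Int) ≤ 10 ^ t.length)
      omega
    · have hP : (0:Int) < 10 ^ t.length := by positivity
      calc ((c.toNat : Int) - 48) * 10 ^ t.length + pvV t
          < ((c.toNat : Int) - 48) * 10 ^ t.length + 10 ^ t.length := by omega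
        _ = (((c.toNat : Int) - 48) + 1) * 10 ^ t.length := by ring
        _ ≤ 10 * 10 ^ t.length := by
            apply mul_le_mul_of_nonneg_right (by omega) (le_of_lt hP)
        _ = 10 ^ (c :: t).length := by rw [List.length_cons]; ring

theorem pvV_inj (d₁ d₂ : List Char) (h₁ : ∀ c ∈ d₁, pvDigit c) (h₂ : ∀ c ∈ d₂, pvDigit c)
    (hl : d₁.length = d₂.length) (hv : pvV d₁ = pvV d₂) : d₁ = d₂ := by
  induction d₁ generalizing d₂ with
  | nil => cases d₂ <;> simp_all
  | cons c t ih =>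
    cases d₂ with
    | nil => simp at hl
    | cons c' t' =>
      simp only [List.length_cons, Nat.add_right_cancel_iff] at hl
      rw [pvV_cons, pvV_cons, hl] at hv
      obtain ⟨hv1, hv2⟩ := pvV_bounds t (fun x hx => h₁ x (by simp [hx]))
      obtain ⟨hv1', hv2'⟩ := pvV_bounds t' (fun x hx => h₂ x (by simp [hx]))
      rw [hl] at hv2
      have hc := h₁ c (by simp); have hc' := h₂ c' (by simp)
      simp only [pvDigit] at hc hc'
      have hP : (0:Int) < 10 ^ t'.length := by positivity
      have heq : (c.toNat : Int) = (c'.toNat : Int) := by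
        by_contra hne
        rcases lt_or_gt_of_ne hne with hlt | hlt
        · have : ((c.toNat : Int) - 48 + 1) * 10 ^ t'.length ≤ ((c'.toNat : Int) - 48) * 10 ^ t'.length :=
            mul_le_mul_of_nonneg_right (by omega) (le_of_lt hP)
          nlinarith
        · have : ((c'.toNat : Int) - 48 + 1) * 10 ^ t'.length ≤ ((c.toNat : Int) - 48) * 10 ^ t'.length :=
            mul_le_mul_of_nonneg_right (by omega) (le_of_lt hP)
          nlinarith
      have hcc : c = c' := by
        have hnat : c.toNat = c'.toNat := by exact_mod_cast heq
        exact Char.ext (UInt32.toNat_inj.mp hnat)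
      subst hcc
      have : pvV t = pvV t' := by
        rw [heq] at hv; omega
      exact congrArg _ (ih t' (fun x hx => h₁ x (by simp [hx])) (fun x hx => h₂ x (by simp [hx])) hl this)

theorem pvV_toDigits (k : Nat) : pvV (Nat.toDigits 10 k) = (k : Int) := by
  induction k using Nat.strong_induction_on with
  | _ k ih =>
    rw [Nat.toDigits_eq_if (by norm_num)]
    by_cases h : k < 10
    · rw [if_pos h]
      interval_cases k <;> simp [pvV, Nat.digitChar]
    · rw [if_neg h]
      have happ : pvV (Nat.toDigits 10 (k / 10) ++ [(k % 10).digitChar])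
          = pvV (Nat.toDigits 10 (k / 10)) * 10 + (((k % 10).digitChar.toNat : Int) - 48) := by
        simp [pvV, List.foldl_append]
      rw [happ, ih (k / 10) (by omega)]
      have h2 : k % 10 < 10 := Nat.mod_lt _ (by norm_num)
      have : ((k % 10).digitChar.toNat : Int) - 48 = (k % 10 : Int) := by
        interval_cases h3 : k % 10 <;> simp [Nat.digitChar] <;> omega
      rw [this]
      push_cast
      omega

theorem digits_toDigits (k : Nat) : ∀ c ∈ Nat.toDigits 10 k, pvDigit c := by
  intro c hc
  have hd := Nat.isDigit_of_mem_toDigits (by norm_num) (by norm_num) hc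
  simp [Char.isDigit] at hd
  exact ⟨hd.1, hd.2⟩

theorem zfill_of_digits (cs : List Char) (w : Int) (hne : cs ≠ []) (h : ∀ c ∈ cs, pvDigit c) :
    PySem.Chars.zfill cs w = List.replicate (w.toNat - cs.length) '0' ++ cs := by
  unfold PySem.Chars.zfill
  by_cases hw : w ≤ (cs.length : Int)
  · rw [if_pos hw]
    have : w.toNat - cs.length = 0 := by omega
    simp [this]
  · rw [if_neg hw]
    cases cs with
    | nil => exact absurd rfl hne
    | cons c rest =>
      have hc := h c (by simp)
      simp only [pvDigit] at hc
      show (if c = '+' ∨ c = '-' then c :: (List.replicate (w.toNat - (c :: rest).length) '0' ++ rest)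
          else List.replicate (w.toNat - (c :: rest).length) '0' ++ c :: rest) = _
      rw [if_neg]
      rintro (hs | hs) <;> rw [hs] at hc <;> exact absurd hc.1 (by decide)

theorem pvV_zeros (k : Nat) :
    (List.replicate k '0').foldl (fun a c => a * 10 + ((c.toNat : Int) - 48)) 0 = 0 := by
  induction k with
  | zero => simp
  | succ n ih => simpa [List.replicate_succ] using ih

theorem pvV_replicate_zero_append (k : Nat) (d : List Char) :
    pvV (List.replicate k '0' ++ d) = pvV d := by
  simp only [pvV, List.foldl_append]
  rw [pvV_zeros]

-- properties of the zero-padded representation of 1 ≤ m < 10^num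
theorem pvPad_spec (num : Nat) (m : Int) (h1 : 1 ≤ m) (h2 : m < 10 ^ num) :
    (PySem.Chars.zfill (PySem.Int.toChars m) (num : Int)).length = num ∧
    (∀ c ∈ PySem.Chars.zfill (PySem.Int.toChars m) (num : Int), pvDigit c) ∧
    pvV (PySem.Chars.zfill (PySem.Int.toChars m) (num : Int)) = m := by
  have hm0 : ¬ m < 0 := by omega
  have htc : PySem.Int.toChars m = Nat.toDigits 10 m.toNat := by
    simp [PySem.Int.toChars, hm0]
  have hnum0 : 0 < num := by
    by_contra h
    have : num = 0 := by omega
    rw [this] at h2; simp at h2; omega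
  have hlen : (Nat.toDigits 10 m.toNat).length ≤ num := by
    rw [Nat.length_toDigits_le_iff (by norm_num) hnum0]
    have h10 : ((10 ^ num : Nat) : Int) = (10 : Int) ^ num := by push_cast; ring
    omega
  have hne : Nat.toDigits 10 m.toNat ≠ [] := by
    have := Nat.length_toDigits_pos (b := 10) (n := m.toNat)
    intro h; rw [h] at this; simp at this
  rw [htc, zfill_of_digits _ _ hne (digits_toDigits _)]
  refine ⟨?_, ?_, ?_⟩
  · simp [List.length_replicate]
    omega
  · intro c hc
    rcases List.mem_append.mp hc with hc | hc
    · have := List.eq_of_mem_replicate hc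
      subst this; exact ⟨by decide, by decide⟩
    · exact digits_toDigits _ c hc
  · rw [pvV_replicate_zero_append, pvV_toDigits]
    omega

-- membership equivalence, → direction
theorem mem_vals_of_fmt_mem (prefixo : String) (ramais : List String) (m : Int)
    (hp : prefixo.toList.length ≤ 3) (h1 : 1 ≤ m) (h2 : m < 10 ^ (4 - prefixo.toList.length))
    (hm : pvFmt prefixo ((4 - prefixo.toList.length : Nat) : Int) m ∈ ramais) :
    m ∈ pvVals prefixo ramais := by
  apply List.mem_filterMap.mpr
  refine ⟨pvFmt prefixo ((4 - prefixo.toList.length : Nat) : Int) m, hm, ?_⟩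
  obtain ⟨hlen, hdig, hval⟩ := pvPad_spec (4 - prefixo.toList.length) m h1 h2
  have htl : (pvFmt prefixo ((4 - prefixo.toList.length : Nat) : Int) m).toList
      = prefixo.toList ++ PySem.Chars.zfill (PySem.Int.toChars m) ((4 - prefixo.toList.length : Nat) : Int) := by
    simp [pvFmt]
  rw [htl]
  rw [if_pos]
  · rw [List.drop_left]
    rw [pvSufVal?_of_digits _ hdig 0]
    rw [hval]; simp
  · rw [Bool.and_eq_true]
    constructor
    · simp only [List.length_append, hlen, beq_iff_eq]
      omega
    · rw [PySem.Chars.startswith_iff]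
      exact List.prefix_append _ _

-- membership equivalence, ← direction
theorem of_mem_vals (prefixo : String) (ramais : List String) (m : Int)
    (_hp : prefixo.toList.length ≤ 3) (hm : m ∈ pvVals prefixo ramais) :
    0 ≤ m ∧ m < 10 ^ (4 - prefixo.toList.length) ∧
      (1 ≤ m → pvFmt prefixo ((4 - prefixo.toList.length : Nat) : Int) m ∈ ramais) := by
  obtain ⟨r, hr, hφ⟩ := List.mem_filterMap.mp hm
  by_cases hcond : (r.toList.length == 4 && PySem.Chars.startswith r.toList prefixo.toList) = true
  · rw [if_pos hcond] at hφ
    obtain ⟨hl4, hsw⟩ := Bool.and_eq_true_iff.mp hcond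
    have hl4' : r.toList.length = 4 := by simpa using hl4
    have hdig := digits_of_pvSufVal? _ 0 m hφ
    have hdl : (r.toList.drop prefixo.toList.length).length = 4 - prefixo.toList.length := by
      simp [List.length_drop, hl4']
    have hvm : pvV (r.toList.drop prefixo.toList.length) = m := by
      rw [pvSufVal?_of_digits _ hdig 0, Option.some_inj] at hφ
      rw [← hφ]; ring
    obtain ⟨hb0, hb1⟩ := pvV_bounds _ hdig
    rw [hdl, hvm] at hb1
    refine ⟨by omega, hb1, ?_⟩
    intro h1m
    obtain ⟨hplen, hpdig, hpval⟩ := pvPad_spec (4 - prefixo.toList.length) m h1m hb1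
    have hd : r.toList.drop prefixo.toList.length
        = PySem.Chars.zfill (PySem.Int.toChars m) ((4 - prefixo.toList.length : Nat) : Int) :=
      pvV_inj _ _ hdig hpdig (by rw [hdl, hplen]) (by rw [hvm, hpval])
    have hpre : prefixo.toList <+: r.toList := (PySem.Chars.startswith_iff _ _).mp hsw
    obtain ⟨tl, htl⟩ := hpre
    have htl2 : r.toList = prefixo.toList ++ r.toList.drop prefixo.toList.length := by
      conv_lhs => rw [← htl]
      rw [← htl, List.drop_left]
    have : pvFmt prefixo ((4 - prefixo.toList.length : Nat) : Int) m = r := by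
      rw [pvFmt, ← hd, ← htl2, String.ofList_toList]
    rw [this]; exact hr
  · rw [if_neg hcond] at hφ
    simp at hφ

-- the gap walk stays put when no element equals the accumulator
theorem walk_const (l : List Int) (e : Int) (h : ∀ x ∈ l, x ≠ e) :
    l.foldl (fun e u => if u = e then e + 1 else e) e = e := by
  induction l with
  | nil => rfl
  | cons x t ih =>
    simp only [List.foldl_cons, if_neg (h x (by simp))]
    exact ih (fun y hy => h y (by simp [hy]))

-- the gap walk over a sorted list computes the least value ≥ e missing from the list
theorem walk_spec (l : List Int) (hs : l.Pairwise (· ≤ ·)) (e : Int) :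
    e ≤ l.foldl (fun e u => if u = e then e + 1 else e) e ∧
    l.foldl (fun e u => if u = e then e + 1 else e) e ∉ l ∧
    (∀ m, e ≤ m → m < l.foldl (fun e u => if u = e then e + 1 else e) e → m ∈ l) := by
  induction l generalizing e with
  | nil => simp
  | cons u t ih =>
    have hp := List.pairwise_cons.mp hs
    by_cases hu : u = e
    · subst hu
      rw [List.foldl_cons, if_pos rfl]
      obtain ⟨h1, h2, h3⟩ := ih hp.2 (u + 1)
      refine ⟨by omega, ?_, ?_⟩
      · intro hmem
        rcases List.mem_cons.mp hmem with heq | hmem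
        · omega
        · exact h2 hmem
      · intro m hm1 hm2
        rcases eq_or_lt_of_le hm1 with rfl | hlt
        · simp
        · exact List.mem_cons_of_mem _ (h3 m (by omega) hm2)
    · simp only [List.foldl_cons, if_neg hu]
      rcases lt_or_gt_of_ne hu with hlt | hgt
      · obtain ⟨h1, h2, h3⟩ := ih hp.2 e
        refine ⟨h1, ?_, ?_⟩
        · intro hmem
          rcases List.mem_cons.mp hmem with heq | hmem
          · omega
          · exact h2 hmem
        · intro m hm1 hm2
          exact List.mem_cons_of_mem _ (h3 m hm1 hm2)
      · rw [walk_const t e (fun x hx => by have := hp.1 x hx; omega)]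
        refine ⟨le_refl _, ?_, ?_⟩
        · intro hmem
          rcases List.mem_cons.mp hmem with heq | hmem
          · omega
          · have := hp.1 _ hmem; omega
        · intro m hm1 hm2; omega

-- characterisation of A's probing loop in terms of the least gap r
theorem pvALoop_eq (prefixo : String) (ramais : List String) (hp : prefixo.toList.length ≤ 3)
    (fuel : Nat) (s r : Int)
    (hs1 : 1 ≤ s) (hs2 : s < 10 ^ (4 - prefixo.toList.length))
    (hsr : s ≤ r) (hr : r ≤ 10 ^ (4 - prefixo.toList.length))
    (hin : ∀ m, s ≤ m → m < r → pvFmt prefixo ((4 - prefixo.toList.length : Nat) : Int) m ∈ ramais)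
    (hout : r < 10 ^ (4 - prefixo.toList.length) →
      pvFmt prefixo ((4 - prefixo.toList.length : Nat) : Int) r ∉ ramais)
    (hfuel : 10 ^ (4 - prefixo.toList.length) ≤ (fuel : Int) + s) :
    pvALoop prefixo ramais fuel s =
      if r < 10 ^ (4 - prefixo.toList.length)
      then pvFmt prefixo ((4 - prefixo.toList.length : Nat) : Int) r else "" := by
  induction fuel generalizing s with
  | zero => rw [Nat.cast_zero, zero_add] at hfuel; omega
  | succ f ih =>
    have hlen : PySem.Str.len prefixo = (prefixo.toList.length : Int) := PySem.Str.len_eq prefixo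
    have hnum : (4 : Int) - PySem.Str.len prefixo = ((4 - prefixo.toList.length : Nat) : Int) := by
      rw [hlen]; omega
    have hnumtoNat : ((4 : Int) - PySem.Str.len prefixo).toNat = 4 - prefixo.toList.length := by
      rw [hlen]; omega
    show (if (4 : Int) - PySem.Str.len prefixo < 1 then PySem.Str.slice prefixo none (some 4)
      else if pvFmt prefixo ((4 : Int) - PySem.Str.len prefixo) s ∈ ramais then
        (if s + 1 ≥ 10 ^ ((4 : Int) - PySem.Str.len prefixo).toNat then ""
         else pvALoop prefixo ramais f (s + 1))
      else pvFmt prefixo ((4 : Int) - PySem.Str.len prefixo) s) = _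
    rw [if_neg (by rw [hlen]; omega)]
    rw [hnumtoNat, hnum]
    by_cases hc : pvFmt prefixo ((4 - prefixo.toList.length : Nat) : Int) s ∈ ramais
    · rw [if_pos hc]
      have hsr' : s < r := by
        rcases eq_or_lt_of_le hsr with rfl | h
        · by_cases hrN : s < 10 ^ (4 - prefixo.toList.length)
          · exact absurd hc (hout hrN)
          · omega
        · exact h
      by_cases hstop : s + 1 ≥ 10 ^ (4 - prefixo.toList.length)
      · rw [if_pos hstop]
        have : ¬ r < 10 ^ (4 - prefixo.toList.length) := by omega
        rw [if_neg this]
      · rw [if_neg hstop]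
        exact ih (s + 1) (by omega) (by omega) (by omega)
          (fun m hm1 hm2 => hin m (by omega) hm2) (by push_cast at hfuel ⊢; omega)
    · rw [if_neg hc]
      have hsr' : s = r := by
        rcases eq_or_lt_of_le hsr with h | h
        · exact h
        · exact absurd (hin s (le_refl _) h) hc
      subst hsr'
      rw [if_pos hs2]

-- A's loop when the prefix already has 4 or more characters
theorem pvALoop_short (prefixo : String) (ramais : List String)
    (hp4 : 4 ≤ prefixo.toList.length) (f : Nat) (s : Int) :
    pvALoop prefixo ramais (f + 1) s = PySem.Str.slice prefixo none (some 4) := by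
  show (if (4 : Int) - PySem.Str.len prefixo < 1 then PySem.Str.slice prefixo none (some 4)
    else if pvFmt prefixo ((4 : Int) - PySem.Str.len prefixo) s ∈ ramais then
      (if s + 1 ≥ 10 ^ ((4 : Int) - PySem.Str.len prefixo).toNat then ""
       else pvALoop prefixo ramais f (s + 1))
    else pvFmt prefixo ((4 : Int) - PySem.Str.len prefixo) s) = _
  rw [if_pos (by rw [PySem.Str.len_eq]; omega)]

-- ===== VERDICT (by name: the statement is the Claim_ definition above) =====
theorem gerar_ramal_unico_spec : Claim_equal_gerar_ramal_unico := by
  intro prefixo ramais _hdom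
  show gerar_ramal_unico prefixo ramais = gerar_ramal_unico_alt prefixo ramais
  by_cases hp4 : 4 ≤ prefixo.toList.length
  · have hA : gerar_ramal_unico prefixo ramais = PySem.Str.slice prefixo none (some 4) := by
      show pvALoop prefixo ramais 10000 1 = _
      rw [show (10000 : Nat) = 9999 + 1 from rfl, pvALoop_short prefixo ramais hp4]
    have hslice : PySem.Str.slice prefixo none (some 4) = String.ofList (prefixo.toList.take 4) := by
      rw [← String.ofList_toList (s := PySem.Str.slice prefixo none (some 4)), PySem.Str.toList_slice]
      simp [pysem]
    rw [hA, hslice]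
    simp only [gerar_ramal_unico_alt]
    rw [if_pos hp4]
  · have hp : prefixo.toList.length ≤ 3 := by omega
    obtain ⟨h1, h2, h3⟩ := walk_spec (PySem.List.sorted (pvVals prefixo ramais) (fun x => x) false)
      (PySem.List.sorted_pairwise _ _) 1
    set r := (PySem.List.sorted (pvVals prefixo ramais) (fun x => x) false).foldl
      (fun e u => if u = e then e + 1 else e) 1 with hrdef
    have hmemL : ∀ x : Int, x ∈ PySem.List.sorted (pvVals prefixo ramais) (fun x => x) false
        ↔ x ∈ pvVals prefixo ramais :=
      fun x => (PySem.List.sorted_perm (pvVals prefixo ramais) (fun x => x) false).mem_iff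
    have hvalsN : ∀ u ∈ pvVals prefixo ramais, u < 10 ^ (4 - prefixo.toList.length) :=
      fun u hu => (of_mem_vals prefixo ramais u hp hu).2.1
    have hN1 : (1 : Int) < 10 ^ (4 - prefixo.toList.length) := by
      have h10 : (10 : Int) ^ 1 ≤ 10 ^ (4 - prefixo.toList.length) :=
        pow_le_pow_right₀ (by norm_num) (by omega)
      rw [pow_one] at h10; omega
    have hrN : r ≤ 10 ^ (4 - prefixo.toList.length) := by
      by_contra hx
      have hmem := h3 (10 ^ (4 - prefixo.toList.length)) (by omega) (by omega)
      have := hvalsN _ ((hmemL _).mp hmem)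
      omega
    have hin : ∀ m, 1 ≤ m → m < r →
        pvFmt prefixo ((4 - prefixo.toList.length : Nat) : Int) m ∈ ramais :=
      fun m hm1 hm2 => (of_mem_vals prefixo ramais m hp ((hmemL m).mp (h3 m hm1 hm2))).2.2 hm1
    have hout : r < 10 ^ (4 - prefixo.toList.length) →
        pvFmt prefixo ((4 - prefixo.toList.length : Nat) : Int) r ∉ ramais :=
      fun hlt hmem => h2 ((hmemL r).mpr (mem_vals_of_fmt_mem prefixo ramais r hp (by omega) hlt hmem))
    have hfuel : (10 : Int) ^ (4 - prefixo.toList.length) ≤ ((10000 : Nat) : Int) + 1 := by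
      have h10 : (10 : Int) ^ (4 - prefixo.toList.length) ≤ 10 ^ 4 :=
        pow_le_pow_right₀ (by norm_num) (by omega)
      have h4 : (10 : Int) ^ 4 = 10000 := by norm_num
      have hc : ((10000 : Nat) : Int) = 10000 := by norm_num
      omega
    have hA := pvALoop_eq prefixo ramais hp 10000 1 r (by omega) hN1 h1 hrN hin hout hfuel
    show pvALoop prefixo ramais 10000 1 = _
    rw [hA]
    simp only [gerar_ramal_unico_alt]
    conv_rhs => rw [if_neg hp4, ← hrdef]
    clear_value r
    rcases lt_or_ge r (10 ^ (4 - prefixo.toList.length)) with hlt | hge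
    · rw [if_pos hlt, if_neg (by omega : ¬ 10 ^ (4 - prefixo.toList.length) ≤ r)]
    · rw [if_neg (by omega : ¬ r < 10 ^ (4 - prefixo.toList.length)), if_pos hge]
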